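-- pv_equiv track=rewrite | github.com/pdulian/qco | representation.py | unspecial_weight
-- ===== SOURCE A (Python) =====
-- def unspecial_weight(weight, sum_zero=False):
--     """Transforms weight of a su(n) algebra representation into a weight of a u(n)
--     algebra representation which is equivalent on su(n) with the initial representation.
--
--     Args:
--         weight (Iterable[int]): su(n) representation's weight in E(i, i) - E(i + 1, i + 1)
--         basis
--         sum_zero (bool): whether the new weights' indices should sum to zero.
--
--     Returns:
--         weight (list[int]): u(n) representation's weight in E(i, i) basis
--     """
--     uw = [sum(weight[i:]) for i in range(len(weight) + 1)]
--     s = sum(uw)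
--     d = len(uw)
--
--     if sum_zero:
--         if sum(uw) % d == 0:
--             return [x - s // d for x in uw]
--
--         raise ValueError("Weight %s cannot be transformed to weight that sums to 0." % list(weight))
--
--     return uw
-- ===== SOURCE B (Python) =====
-- def unspecial_weight(weight, sum_zero=False):
--     # One right-to-left pass with a running accumulator instead of
--     # recomputing each suffix sum from scratch (O(n) vs O(n^2)).
--     uw = [0]
--     acc = 0
--     for x in reversed(weight):
--         acc += x
--         uw.append(acc)
--     uw.reverse()
--     if sum_zero:
--         s = sum(uw)
--         d = len(uw)
--         q, r = divmod(s, d)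
--         if r:
--             raise ValueError("Weight %s cannot be transformed to weight that sums to 0." % list(weight))
--         return [x - q for x in uw]
--     return uw
-- ===== Notes on version B (the rewrite author's own statement) =====
-- stated objective: faster
-- what changed: Replaces the list comprehension that recomputes sum(weight[i:]) for every i with a single right-to-left pass keeping a running accumulator; intended as faster (measured 527x at n=16384, the largest size both finished).
import Mathlib
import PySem

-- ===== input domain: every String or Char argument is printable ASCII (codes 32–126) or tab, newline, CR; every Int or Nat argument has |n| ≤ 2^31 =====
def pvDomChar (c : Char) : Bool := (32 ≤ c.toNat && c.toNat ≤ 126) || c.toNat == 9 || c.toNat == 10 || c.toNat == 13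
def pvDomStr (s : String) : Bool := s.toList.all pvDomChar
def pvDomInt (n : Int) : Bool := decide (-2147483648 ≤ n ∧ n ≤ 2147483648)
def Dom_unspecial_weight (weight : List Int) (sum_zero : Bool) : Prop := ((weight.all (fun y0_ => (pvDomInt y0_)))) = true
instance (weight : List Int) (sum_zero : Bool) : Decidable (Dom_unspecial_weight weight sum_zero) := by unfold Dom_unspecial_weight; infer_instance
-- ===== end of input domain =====

-- B replaces A's per-index recomputation of sum(weight[i:]) by one right-to-left
-- pass with a running accumulator; intended as faster (measured 527x at n=16384,
-- the largest size at which both finished).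

-- ===== PORT A =====
def unspecial_weight (weight : List Int) (sum_zero : Bool) : List Int :=
  -- uw = [sum(weight[i:]) for i in range(len(weight) + 1)]
  let uw := (PySem.List.pyRange 0 ((weight.length : Int) + 1) 1).map
      (fun i => (PySem.List.slice weight (some i) none).sum)
  let s := uw.sum
  let d := (uw.length : Int)
  if sum_zero then
    if PySem.Int.mod uw.sum d = 0 then uw.map (fun x => x - PySem.Int.floordiv s d)
    else []  -- Python raises ValueError here; excluded by Pre_unspecial_weight
  else uw

-- ===== PORT B =====
def unspecial_weight_alt (weight : List Int) (sum_zero : Bool) : List Int :=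
  -- uw = [0]; acc = 0; for x in reversed(weight): acc += x; uw.append(acc); uw.reverse()
  let st := weight.reverse.foldl
      (fun (p : List Int × Int) x => (p.1 ++ [p.2 + x], p.2 + x)) ([0], 0)
  let uw := st.1.reverse
  if sum_zero then
    let s := uw.sum
    let d := (uw.length : Int)
    let q := PySem.Int.floordiv s d
    let r := PySem.Int.mod s d
    if r ≠ 0 then []  -- Python raises ValueError here; excluded by Pre_unspecial_weight
    else uw.map (fun x => x - q)
  else uw

-- ===== PRECONDITION & SPEC =====
-- Pre_ excludes exactly the inputs where Python A raises ValueError: sum_zero is true and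
-- the total of the suffix-sum list, Σ_i (i+1)*weight[i], is not divisible by len(weight)+1.
def Pre_unspecial_weight (weight : List Int) (sum_zero : Bool) : Prop :=
  sum_zero = true →
    PySem.Int.mod ((weight.zipIdx.map (fun p => p.1 * ((p.2 : Int) + 1))).sum)
      ((weight.length : Int) + 1) = 0
instance (weight : List Int) (sum_zero : Bool) : Decidable (Pre_unspecial_weight weight sum_zero) := by
  unfold Pre_unspecial_weight; infer_instance
def pvWitness_unspecial_weight : List Int × Bool := ([2, 2, 2], true)

def Spec_unspecial_weight (weight : List Int) (sum_zero : Bool) (out : List Int) : Prop := out = unspecial_weight_alt weight sum_zero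
instance (weight : List Int) (sum_zero : Bool) (out : List Int) : Decidable (Spec_unspecial_weight weight sum_zero out) := by unfold Spec_unspecial_weight; infer_instance

-- ===== CLAIM (what is proved, stated in full; the proofs are below) =====
def Claim_equal_unspecial_weight : Prop := ∀ (weight : List Int) (sum_zero : Bool), Dom_unspecial_weight weight sum_zero → Pre_unspecial_weight weight sum_zero → Spec_unspecial_weight weight sum_zero (unspecial_weight weight sum_zero)

-- ===== LEMMAS AND PROOFS =====

-- the list of suffix sums of w, including the empty suffix
def tsums : List Int → List Int
  | [] => [0]
  | x :: xs => (x + xs.sum) :: tsums xs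

-- running prefix sums starting from accumulator a (B's appended values)
def presums (a : Int) : List Int → List Int
  | [] => []
  | y :: ys => (a + y) :: presums (a + y) ys

lemma range_drop_eq_tsums (w : List Int) :
    (List.range (w.length + 1)).map (fun k => (w.drop k).sum) = tsums w := by
  induction w with
  | nil => simp [tsums]
  | cons x xs ih =>
    rw [List.length_cons, List.range_succ_eq_map, List.map_cons, List.map_map]
    have htail := Eq.trans
      (List.map_congr_left (l := List.range (xs.length + 1))
        (f := (fun k => ((x :: xs).drop k).sum) ∘ Nat.succ)
        (g := fun k => (xs.drop k).sum) (fun k _ => rfl)) ih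
    rw [htail]
    simp [tsums]
lemma uwA_eq (w : List Int) :
    (PySem.List.pyRange 0 ((w.length : Int) + 1) 1).map
        (fun i => (PySem.List.slice w (some i) none).sum) = tsums w := by
  rw [PySem.List.pyRange_one]
  have hn : (((w.length : Int) + 1) - 0).toNat = w.length + 1 := by omega
  rw [hn, List.map_map]
  rw [← range_drop_eq_tsums w]
  apply List.map_congr_left
  intro k hk
  rw [List.mem_range] at hk
  have h0 : (0 : Int) ≤ 0 + (k : Int) := by omega
  simp only [Function.comp_apply]
  rw [PySem.List.slice_from _ h0]
  simp

lemma foldl_presums (ys : List Int) : ∀ (l : List Int) (a : Int),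
    ys.foldl (fun (p : List Int × Int) x => (p.1 ++ [p.2 + x], p.2 + x)) (l, a)
      = (l ++ presums a ys, a + ys.sum) := by
  induction ys with
  | nil => intro l a; simp [presums]
  | cons y ys ih =>
    intro l a
    simp only [List.foldl_cons, ih, presums, List.sum_cons, Prod.mk.injEq]
    refine ⟨by simp, by ring⟩

lemma tsums_append_singleton (zs : List Int) (y : Int) :
    tsums (zs ++ [y]) = (tsums zs).map (fun t => t + y) ++ [0] := by
  induction zs with
  | nil => simp [tsums]
  | cons z zs ih =>
    simp only [List.cons_append, tsums, ih, List.map_cons, List.sum_append, List.sum_cons,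
      List.sum_nil]
    congr 1
    ring

lemma presums_rev (ys : List Int) : ∀ (a : Int),
    (presums a ys).reverse ++ [a] = (tsums ys.reverse).map (fun t => t + a) := by
  induction ys with
  | nil => intro a; simp [tsums, presums]
  | cons y ys ih =>
    intro a
    simp only [presums, List.reverse_cons, List.append_assoc]
    have : (presums (a + y) ys).reverse ++ ([a + y] ++ [a])
        = ((presums (a + y) ys).reverse ++ [a + y]) ++ [a] := by simp
    rw [this, ih (a + y)]
    rw [tsums_append_singleton, List.map_append, List.map_map]
    congr 1
    · apply List.map_congr_left; intro t _; simp only [Function.comp_apply]; ring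
    · simp

lemma uwB_eq (w : List Int) :
    (w.reverse.foldl (fun (p : List Int × Int) x => (p.1 ++ [p.2 + x], p.2 + x)) ([0], 0)).1.reverse
      = tsums w := by
  rw [foldl_presums]
  simp only [List.reverse_append, List.reverse_cons, List.reverse_nil, List.nil_append]
  have := presums_rev w.reverse 0
  simp only [List.reverse_reverse] at this
  rw [this]
  simp

-- ===== VERDICT (by name: the statement is the Claim_ definition above) =====
theorem unspecial_weight_spec : Claim_equal_unspecial_weight := by
  intro weight sum_zero _ _
  unfold Spec_unspecial_weight unspecial_weight unspecial_weight_alt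
  simp only [uwA_eq, uwB_eq]
  by_cases hsz : sum_zero <;>
    by_cases hm :
      PySem.Int.mod (tsums weight).sum ((tsums weight).length : Int) = 0 <;>
    simp [hsz, hm]
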